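-- pv_equiv track=rewrite | github.com/shreyasajj/Daily-GoalList-Home-Assistant | goallist.py | failedGoalHelper
-- ===== SOURCE A (Python) =====
-- def failedGoalHelper(reset_window, failed_goals):
--     if not failed_goals:
--         return False
--     output_string = f"Failed to accomplish these goals in %d days: %s" % (reset_window, failed_goals[0])
--     for i in range(1, len(failed_goals)):
--         if not i == len(failed_goals)-1:
--             output_string+= ", "+failed_goals[i]
--         else:
--             output_string+= ", and "+failed_goals[i]
--     return output_string
-- ===== SOURCE B (Python) =====
-- def failedGoalHelper(reset_window, failed_goals):
--     if not failed_goals: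
--         return False
--     out = "Failed to accomplish these goals in %d days: %s" % (reset_window, failed_goals[0])
--     mid = failed_goals[1:-1]
--     if mid:
--         out += ", " + ", ".join(mid)
--     if len(failed_goals) >= 2:
--         out += ", and " + failed_goals[-1]
--     return out
-- ===== Notes on version B (the rewrite author's own statement) =====
-- stated objective: simpler
-- what changed: Replaces the indexed loop with its per-iteration last-vs-middle branch by two branch-free steps: one ', '.join of the middle slice failed_goals[1:-1], then ', and ' + failed_goals[-1] when there are at least two goals.
-- outside the precondition, e.g. on failedGoalHelper(7, []): A returns False, B returns False
import Mathlib
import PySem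

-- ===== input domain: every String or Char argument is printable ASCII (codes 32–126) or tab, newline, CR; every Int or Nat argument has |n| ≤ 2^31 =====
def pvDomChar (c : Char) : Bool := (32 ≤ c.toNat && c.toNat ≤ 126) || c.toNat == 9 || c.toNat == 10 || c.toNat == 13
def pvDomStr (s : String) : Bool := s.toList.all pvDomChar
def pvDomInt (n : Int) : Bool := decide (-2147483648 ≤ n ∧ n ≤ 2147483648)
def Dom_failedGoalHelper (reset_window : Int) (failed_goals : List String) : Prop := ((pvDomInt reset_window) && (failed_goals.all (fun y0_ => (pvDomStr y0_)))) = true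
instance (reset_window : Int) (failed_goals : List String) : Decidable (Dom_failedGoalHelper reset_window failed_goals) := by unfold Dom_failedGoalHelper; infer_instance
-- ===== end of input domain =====

-- B replaces A's indexed loop (with its per-iteration last-vs-middle branch) by one join of the
-- middle slice plus one append of the last element (objective: a simpler decomposition).

-- ===== PORT A =====
def failedGoalHelper (reset_window : Int) (failed_goals : List String) : Option String :=
  match failed_goals with
  | [] => none   -- Python returns False here (not a string); excluded by Pre_
  | _ :: _ =>
    let output_string := "Failed to accomplish these goals in " ++ PySem.Int.toStr reset_window
      ++ " days: " ++ PySem.List.pyGetD failed_goals 0 ""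
    some ((PySem.List.pyRange 1 (failed_goals.length : Int)).foldl
      (fun s i =>
        if ¬ (i = (failed_goals.length : Int) - 1) then
          s ++ ", " ++ PySem.List.pyGetD failed_goals i ""
        else
          s ++ ", and " ++ PySem.List.pyGetD failed_goals i "")
      output_string)

-- ===== PORT B =====
def failedGoalHelper_alt (reset_window : Int) (failed_goals : List String) : Option String :=
  match failed_goals with
  | [] => none   -- Python returns False here (not a string); excluded by Pre_
  | _ :: _ =>
    let out := "Failed to accomplish these goals in " ++ PySem.Int.toStr reset_window
      ++ " days: " ++ PySem.List.pyGetD failed_goals 0 ""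
    let mid := PySem.List.slice failed_goals (some 1) (some (-1))
    let out := if mid ≠ [] then out ++ ", " ++ PySem.Str.join ", " mid else out
    let out := if 2 ≤ failed_goals.length then
        out ++ ", and " ++ PySem.List.pyGetD failed_goals (-1) ""
      else out
    some out

-- ===== PRECONDITION & SPEC =====
-- Pre_ excludes only the empty list, on which Python A returns False — a bool, not a string.
def Pre_failedGoalHelper (reset_window : Int) (failed_goals : List String) : Prop :=
  failed_goals ≠ []
instance (reset_window : Int) (failed_goals : List String) : Decidable (Pre_failedGoalHelper reset_window failed_goals) := by unfold Pre_failedGoalHelper; infer_instance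
def pvWitness_failedGoalHelper : Int × List String := (7, ["walk", "read", "swim"])

def Spec_failedGoalHelper (reset_window : Int) (failed_goals : List String) (out : Option String) : Prop := out = failedGoalHelper_alt reset_window failed_goals
instance (reset_window : Int) (failed_goals : List String) (out : Option String) : Decidable (Spec_failedGoalHelper reset_window failed_goals out) := by unfold Spec_failedGoalHelper; infer_instance

-- ===== CLAIM (what is proved, stated in full; the proofs are below) =====
def Claim_equal_failedGoalHelper : Prop := ∀ (reset_window : Int) (failed_goals : List String), Dom_failedGoalHelper reset_window failed_goals → Pre_failedGoalHelper reset_window failed_goals → Spec_failedGoalHelper reset_window failed_goals (failedGoalHelper reset_window failed_goals)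

-- ===== LEMMAS AND PROOFS =====

lemma str_join_singleton (m : String) : PySem.Str.join ", " [m] = m := by
  apply String.toList_inj.mp
  simp [PySem.Str.toList_join, PySem.Chars.join_singleton]

lemma str_join_cons_cons (p q : String) (r : List String) :
    PySem.Str.join ", " (p :: q :: r) = p ++ ", " ++ PySem.Str.join ", " (q :: r) := by
  apply String.toList_inj.mp
  simp [PySem.Str.toList_join, PySem.Chars.join_cons_cons]

-- A fold appending ", " + element to the accumulator is ", " + the comma-join of the list.
lemma fold_comma_join (t : List String) : ∀ (m s : String),
    (m :: t).foldl (fun acc y => acc ++ ", " ++ y) s = s ++ ", " ++ PySem.Str.join ", " (m :: t) := by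
  induction t with
  | nil => intro m s; simp [str_join_singleton]
  | cons q t ih =>
      intro m s
      simp only [List.foldl_cons] at *
      rw [ih q (s ++ ", " ++ m), str_join_cons_cons]
      simp [String.append_assoc]

-- xs[1:-1] on a cons is the tail without its last element.
lemma slice_one_neg_one (x : String) (xs : List String) :
    PySem.List.slice (x :: xs) (some 1) (some (-1)) = xs.dropLast := by
  simp only [PySem.List.slice, PySem.List.clampIdx_neg_one]
  have h1 : PySem.List.clampIdx (x :: xs).length 1 = 1 := by
    simp [PySem.List.clampIdx]
  rw [h1]
  simp [List.dropLast_eq_take]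

lemma map_range_getD (mid : List String) (f : Nat → String)
    (h : ∀ k, (hk : k < mid.length) → f k = mid[k]) :
    (List.range mid.length).map f = mid := by
  apply List.ext_getElem
  · simp
  · intro k h1 h2
    simpa using h k h2

-- A's loop over indices 1..n-1 of g0 :: mid ++ [last] equals B's join-then-append form.
lemma loop_eq_join (g0 last : String) (mid : List String) (out : String) :
    ((PySem.List.pyRange 1 ((g0 :: (mid ++ [last])).length : Int)).foldl
      (fun s i =>
        if ¬ (i = ((g0 :: (mid ++ [last])).length : Int) - 1) then
          s ++ ", " ++ PySem.List.pyGetD (g0 :: (mid ++ [last])) i ""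
        else
          s ++ ", and " ++ PySem.List.pyGetD (g0 :: (mid ++ [last])) i "") out)
    =
    ((if mid ≠ [] then out ++ ", " ++ PySem.Str.join ", " mid else out)
      ++ ", and " ++ last) := by
  have hn : ((g0 :: (mid ++ [last])).length : Int) = (mid.length : Int) + 1 + 1 := by
    push_cast [List.length_cons, List.length_append, List.length_nil]; ring
  rw [hn, PySem.List.pyRange_one_succ_right (by omega), List.foldl_append]
  have hfin : PySem.List.pyGetD (g0 :: (mid ++ [last])) ((mid.length : Int) + 1) "" = last := by
    have h1 : ((mid.length : Int) + 1) = ((mid.length + 1 : Nat) : Int) := by push_cast; ring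
    rw [h1, PySem.List.pyGetD_natCast]
    simp
  simp only [List.foldl_cons, List.foldl_nil]
  rw [if_neg (by simp), hfin]
  congr 1
  rw [PySem.List.foldl_congr_mem _ _
      (fun s i => s ++ ", " ++ PySem.List.pyGetD (g0 :: (mid ++ [last])) i "") _
      (by
        intro acc x hx
        rw [PySem.List.mem_pyRange_one] at hx
        rw [if_pos (by omega)])]
  have htn : ((mid.length : Int) + 1 - 1).toNat = mid.length := by omega
  rw [PySem.List.pyRange_one, htn, List.foldl_map]
  rw [PySem.List.foldl_congr_mem _ _ (fun s k => s ++ ", " ++ mid.getD k "") _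
      (by
        intro acc k hk
        rw [List.mem_range] at hk
        have h1 : (1 : Int) + k = ((1 + k : Nat) : Int) := by push_cast; ring
        simp only [h1, PySem.List.pyGetD_natCast]
        rw [Nat.add_comm 1 k, List.getD_cons_succ, List.getD_append _ _ _ _ hk])]
  rw [← List.foldl_map]
  rw [map_range_getD mid _ (fun k hk => List.getD_eq_getElem mid "" hk)]
  cases mid with
  | nil => simp
  | cons m t => rw [fold_comma_join, if_pos (by simp)]

-- ===== VERDICT (by name: the statement is the Claim_ definition above) =====
theorem failedGoalHelper_spec : Claim_equal_failedGoalHelper := by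
  intro reset_window failed_goals _ hpre
  unfold Spec_failedGoalHelper
  match failed_goals, hpre with
  | g0 :: rest, _ =>
    rcases eq_or_ne rest [] with hrest | hrest
    · subst hrest
      simp [failedGoalHelper, failedGoalHelper_alt, slice_one_neg_one,
        PySem.List.pyRange_one_eq_nil (by norm_num : (1 : Int) ≤ 1)]
    · obtain ⟨mid, last, hsplit⟩ : ∃ mid last, rest = mid ++ [last] :=
        ⟨rest.dropLast, rest.getLast hrest, (List.dropLast_append_getLast hrest).symm⟩
      subst hsplit
      simp only [failedGoalHelper, failedGoalHelper_alt]
      rw [slice_one_neg_one, List.dropLast_concat]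
      rw [if_pos (by simp)]
      have hlast : PySem.List.pyGetD (g0 :: (mid ++ [last])) (-1) "" = last := by
        rw [show g0 :: (mid ++ [last]) = (g0 :: mid) ++ [last] by simp,
          PySem.List.pyGetD_neg_one_append_singleton]
      rw [hlast, loop_eq_join]
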